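-- pv_equiv track=rewrite | github.com/MMMustafakamran/PDC_Project | dev2/MPI.py | precompute
-- ===== SOURCE A (Python) =====
-- def precompute(vertices, n):
--     """
--     Build:
--       – inv[v]: element→position mapping (1-based) for each permutation v
--       – rpos[v]: rightmost index i where v[i] != i+1
--     """
--     inv = {}
--     rpos = {}
--     for v in vertices:
--         inv[v] = {v[i]: i+1 for i in range(n)}
--         for i in range(n-1, -1, -1):
--             if v[i] != i+1:
--                 rpos[v] = i+1
--                 break
--     return inv, rpos
-- ===== SOURCE B (Python) =====
-- def precompute(vertices, n):
--     """One fused forward pass per permutation: build inv[v] and track the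
--     rightmost misplaced index while scanning left-to-right."""
--     inv = {}
--     rpos = {}
--     for v in vertices:
--         m = {}
--         last = 0
--         found = False
--         for i in range(n):
--             x = v[i]
--             m[x] = i + 1
--             if x != i + 1:
--                 last = i + 1
--                 found = True
--         inv[v] = m
--         if found:
--             rpos[v] = last
--     return inv, rpos
-- ===== Notes on version B (the rewrite author's own statement) =====
-- stated objective: alternative
-- what changed: Replaces A's dict comprehension plus a separate backward break-loop with one fused forward pass per permutation that builds the inverse map and overwrites the rightmost misplaced index as it goes, using a found-flag instead of a backward early exit.
import Mathlib
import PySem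

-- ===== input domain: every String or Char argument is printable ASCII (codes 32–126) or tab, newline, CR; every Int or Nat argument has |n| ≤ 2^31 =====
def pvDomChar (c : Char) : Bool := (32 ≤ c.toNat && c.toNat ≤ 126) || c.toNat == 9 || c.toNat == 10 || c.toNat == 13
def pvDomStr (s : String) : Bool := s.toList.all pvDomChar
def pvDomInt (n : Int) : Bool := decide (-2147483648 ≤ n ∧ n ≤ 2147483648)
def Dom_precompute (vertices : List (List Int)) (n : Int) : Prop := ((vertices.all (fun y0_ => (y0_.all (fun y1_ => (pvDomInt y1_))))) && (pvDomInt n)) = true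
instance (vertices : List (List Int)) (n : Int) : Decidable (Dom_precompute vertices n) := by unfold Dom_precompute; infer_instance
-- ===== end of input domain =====

-- B fuses A's dict comprehension and backward break-loop into one forward pass per
-- permutation (objective: alternative decomposition, same cost); return values only.

-- ===== PORT A =====
-- inner dict comprehension {v[i]: i+1 for i in range(n)}
def pvAInner (v : List Int) (n : Int) : PySem.Dict Int Int :=
  (PySem.List.pyRange 0 n 1).foldl
    (fun d i => d.insert (PySem.List.pyGetD v i 0) (i + 1)) PySem.Dict.empty

-- the backward loop 'for i in range(n-1, -1, -1): if v[i] != i+1: … break'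
def pvAFind (v : List Int) : List Int → Option Int
  | [] => none
  | i :: rest =>
      if PySem.List.pyGetD v i 0 ≠ i + 1 then some (i + 1) else pvAFind v rest

def precompute (vertices : List (List Int)) (n : Int) :
    (List (List Int × List (Int × Int))) × (List (List Int × Int)) :=
  let st := vertices.foldl
    (fun (st : PySem.Dict (List Int) (List (Int × Int)) × PySem.Dict (List Int) Int) v =>
      let inv := st.1.insert v (pvAInner v n).items
      let rpos :=
        match pvAFind v (PySem.List.pyRange (n - 1) (-1) (-1)) with
        | some r => st.2.insert v r
        | none => st.2
      (inv, rpos))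
    (PySem.Dict.empty, PySem.Dict.empty)
  (st.1.items, st.2.items)

-- ===== PORT B =====
-- B's fused forward pass: state (m, last, found)
def pvBScan (v : List Int) (n : Int) : PySem.Dict Int Int × Int × Bool :=
  (PySem.List.pyRange 0 n 1).foldl
    (fun (st : PySem.Dict Int Int × Int × Bool) i =>
      let x := PySem.List.pyGetD v i 0
      let m := st.1.insert x (i + 1)
      if x ≠ i + 1 then (m, i + 1, true) else (m, st.2.1, st.2.2))
    (PySem.Dict.empty, 0, false)

def precompute_alt (vertices : List (List Int)) (n : Int) :
    (List (List Int × List (Int × Int))) × (List (List Int × Int)) :=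
  let st := vertices.foldl
    (fun (st : PySem.Dict (List Int) (List (Int × Int)) × PySem.Dict (List Int) Int) v =>
      let r := pvBScan v n
      let inv := st.1.insert v r.1.items
      let rpos := if r.2.2 then st.2.insert v r.2.1 else st.2
      (inv, rpos))
    (PySem.Dict.empty, PySem.Dict.empty)
  (st.1.items, st.2.items)

-- ===== PRECONDITION & SPEC =====
-- Pre_ excludes exactly the inputs where Python A raises IndexError: some v with n > len(v).
def Pre_precompute (vertices : List (List Int)) (n : Int) : Prop :=
  ∀ v ∈ vertices, n ≤ (v.length : Int)
instance (vertices : List (List Int)) (n : Int) : Decidable (Pre_precompute vertices n) := by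
  unfold Pre_precompute; infer_instance

def pvWitness_precompute : List (List Int) × Int := ([[2, 1, 3], [1, 2]], 2)

def Spec_precompute (vertices : List (List Int)) (n : Int)
    (out : (List (List Int × List (Int × Int))) × (List (List Int × Int))) : Prop :=
  out = precompute_alt vertices n
instance (vertices : List (List Int)) (n : Int)
    (out : (List (List Int × List (Int × Int))) × (List (List Int × Int))) :
    Decidable (Spec_precompute vertices n out) := by unfold Spec_precompute; infer_instance

-- ===== CLAIM (what is proved, stated in full; the proofs are below) =====
def Claim_equal_precompute : Prop := ∀ (vertices : List (List Int)) (n : Int),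
  Dom_precompute vertices n → Pre_precompute vertices n →
  Spec_precompute vertices n (precompute vertices n)

-- ===== LEMMAS AND PROOFS =====

-- A's break-search distributes over append (first hit wins)
theorem pvAFind_append (v : List Int) (l₁ l₂ : List Int) :
    pvAFind v (l₁ ++ l₂) =
      (match pvAFind v l₁ with
       | some r => some r
       | none => pvAFind v l₂) := by
  induction l₁ with
  | nil => simp [pvAFind]
  | cons a l ih =>
      simp only [List.cons_append, pvAFind]
      split_ifs with h
      · rfl
      · exact ih

-- B's forward fold, characterised against A's pieces over an arbitrary index list
theorem pvBScan_fold (v : List Int) (l : List Int)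
    (d : PySem.Dict Int Int) (s : Int × Bool) :
    l.foldl
      (fun (st : PySem.Dict Int Int × Int × Bool) i =>
        let x := PySem.List.pyGetD v i 0
        let m := st.1.insert x (i + 1)
        if x ≠ i + 1 then (m, i + 1, true) else (m, st.2.1, st.2.2))
      (d, s) =
    (l.foldl (fun d i => d.insert (PySem.List.pyGetD v i 0) (i + 1)) d,
     match pvAFind v l.reverse with
     | some r => (r, true)
     | none => s) := by
  induction l generalizing d s with
  | nil => simp [pvAFind]
  | cons a l ih =>
      simp only [List.foldl_cons, List.reverse_cons, pvAFind_append, pvAFind]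
      split_ifs with h
      · rw [ih]
        cases pvAFind v l.reverse <;> simp
      · rw [ih]
        cases pvAFind v l.reverse <;> simp

-- per-vertex step functions of the two outer folds agree
theorem pvStep_eq (n : Int)
    (st : PySem.Dict (List Int) (List (Int × Int)) × PySem.Dict (List Int) Int)
    (v : List Int) :
    (let inv := st.1.insert v (pvAInner v n).items
     let rpos :=
       match pvAFind v (PySem.List.pyRange (n - 1) (-1) (-1)) with
       | some r => st.2.insert v r
       | none => st.2
     (inv, rpos)) =
    (let r := pvBScan v n
     let inv := st.1.insert v r.1.items
     let rpos := if r.2.2 then st.2.insert v r.2.1 else st.2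
     (inv, rpos)) := by
  have hrange : PySem.List.pyRange (n - 1) (-1) (-1) =
      (PySem.List.pyRange 0 n 1).reverse := by
    have := PySem.List.pyRange_neg_one_eq_reverse (n - 1) (-1)
    simpa using this
  simp only [pvBScan, pvAInner, pvBScan_fold v (PySem.List.pyRange 0 n 1)
    PySem.Dict.empty (0, false), hrange]
  cases pvAFind v (PySem.List.pyRange 0 n 1).reverse <;> simp

theorem pvFold_eq (n : Int) (vs : List (List Int)) :
    ∀ (st : PySem.Dict (List Int) (List (Int × Int)) × PySem.Dict (List Int) Int),
      vs.foldl
        (fun st v =>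
          let inv := st.1.insert v (pvAInner v n).items
          let rpos :=
            match pvAFind v (PySem.List.pyRange (n - 1) (-1) (-1)) with
            | some r => st.2.insert v r
            | none => st.2
          (inv, rpos)) st =
      vs.foldl
        (fun st v =>
          let r := pvBScan v n
          let inv := st.1.insert v r.1.items
          let rpos := if r.2.2 then st.2.insert v r.2.1 else st.2
          (inv, rpos)) st := by
  induction vs with
  | nil => intro st; rfl
  | cons v l ih =>
      intro st
      simp only [List.foldl_cons]
      rw [pvStep_eq n st v]
      exact ih _

-- ===== VERDICT (by name: the statement is the Claim_ definition above) =====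
theorem precompute_spec : Claim_equal_precompute := by
  intro vertices n _ _
  unfold Spec_precompute precompute precompute_alt
  rw [pvFold_eq n vertices]
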